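-- pv_equiv track=rewrite | github.com/michahutter/SMOTE_fingerprints | code/update_join.py | get_smiles_length
-- ===== SOURCE A (Python) =====
-- def get_smiles_length(smiles):
--     """ Determines the number of non-H-atoms in a SMILES.
--
--     Parameters
--     ----------
--     smiles : str
--         SMILES to count non-H-atoms on.
--
--     Returns
--     -------
--     int
--         Number of non-H-atoms in given SMILES.
--     """
--
--     count = 0
--     for i in range(len(smiles)):
--         if smiles[i].isalpha():
--             count = count + 1
--
--     h_amount = smiles.count('H')
--     h_amount = h_amount + smiles.count('h')
--
--     return count - h_amount
-- ===== SOURCE B (Python) =====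
-- def get_smiles_length(smiles):
--     """Number of non-H atoms in a SMILES: one pass, counting alphabetic chars other than H/h."""
--     return sum(1 for c in smiles if c.isalpha() and c not in ('H', 'h'))
-- ===== Notes on version B (the rewrite author's own statement) =====
-- stated objective: simpler
-- what changed: Replaced A's index loop over range(len(s)) plus two separate .count scans and a subtraction with a single generator-expression pass that directly counts alphabetic characters other than 'H'/'h' (valid because H/h are themselves alphabetic).
import Mathlib
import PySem

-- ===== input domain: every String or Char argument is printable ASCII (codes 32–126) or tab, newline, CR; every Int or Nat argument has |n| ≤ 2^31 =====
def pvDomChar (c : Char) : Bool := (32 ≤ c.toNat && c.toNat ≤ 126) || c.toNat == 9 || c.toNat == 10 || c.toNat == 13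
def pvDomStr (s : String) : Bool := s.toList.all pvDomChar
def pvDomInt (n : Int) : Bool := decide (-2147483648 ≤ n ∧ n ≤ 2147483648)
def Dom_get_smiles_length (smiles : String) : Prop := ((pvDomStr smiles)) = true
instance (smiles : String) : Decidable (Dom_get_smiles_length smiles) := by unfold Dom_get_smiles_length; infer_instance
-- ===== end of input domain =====

-- B replaces A's letter-counting loop plus two .count scans and a subtraction by a single
-- pass that directly counts alphabetic characters other than 'H'/'h' (objective: simpler).

-- ===== PORT A =====
-- index loop 'for i in range(len(smiles))': smiles[i] is always in range, so pyGetD's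
-- default ' ' is never returned
def get_smiles_length (smiles : String) : Int :=
  let count : Int :=
    (PySem.List.pyRange 0 (PySem.Str.len smiles) 1).foldl
      (fun count i =>
        if PySem.Chars.isalpha (PySem.List.pyGetD smiles.toList i ' ') then count + 1 else count) 0
  let h_amount : Int := (PySem.Str.count smiles "H" : Int)
  let h_amount : Int := h_amount + (PySem.Str.count smiles "h" : Int)
  count - h_amount

-- ===== PORT B =====
-- sum(1 for c in smiles if c.isalpha() and c not in ('H', 'h'))
def get_smiles_length_alt (smiles : String) : Int :=
  smiles.toList.foldl
    (fun acc c => if PySem.Chars.isalpha c && c != 'H' && c != 'h' then acc + 1 else acc) 0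

-- ===== PRECONDITION & SPEC =====
def Spec_get_smiles_length (smiles : String) (out : Int) : Prop := out = get_smiles_length_alt smiles
instance (smiles : String) (out : Int) : Decidable (Spec_get_smiles_length smiles out) := by unfold Spec_get_smiles_length; infer_instance

-- ===== CLAIM (what is proved, stated in full; the proofs are below) =====
def Claim_equal_get_smiles_length : Prop := ∀ (smiles : String), Dom_get_smiles_length smiles → Spec_get_smiles_length smiles (get_smiles_length smiles)

-- ===== LEMMAS AND PROOFS =====

-- Chars.count with a single-character needle is List.count (unfolds count.go, fuel ≥ length)
lemma chars_count_go_single (c : Char) :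
    ∀ (fuel : Nat) (l : List Char) (acc : Nat), l.length ≤ fuel →
      PySem.Chars.count.go [c] fuel l acc = acc + l.count c := by
  intro fuel
  induction fuel with
  | zero =>
    intro l acc h
    have : l = [] := List.eq_nil_of_length_eq_zero (Nat.le_zero.mp h)
    subst this; rfl
  | succ n ih =>
    intro l acc h
    cases l with
    | nil => rfl
    | cons x t =>
      rw [List.length_cons] at h
      by_cases hx : c = x
      · subst hx
        rw [show PySem.Chars.count.go [c] (n + 1) (c :: t) acc
              = PySem.Chars.count.go [c] n t (acc + 1) by
            simp [PySem.Chars.count.go, List.isPrefixOf]]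
        rw [ih t (acc + 1) (by omega), List.count_cons]
        simp; omega
      · rw [show PySem.Chars.count.go [c] (n + 1) (x :: t) acc
              = PySem.Chars.count.go [c] n t acc by
            simp [PySem.Chars.count.go, List.isPrefixOf, hx]]
        rw [ih t acc (by omega), List.count_cons]
        simp [Ne.symm hx]

lemma chars_count_single (cs : List Char) (c : Char) :
    PySem.Chars.count cs [c] = cs.count c := by
  simp only [PySem.Chars.count, List.isEmpty_cons, if_false, Bool.false_eq_true]
  simpa using chars_count_go_single c cs.length cs 0 (le_refl _)

-- 'H' and 'h' are alphabetic, so counting letters and subtracting H/h counts equals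
-- counting letters other than H/h in one pass
lemma countP_sub_counts (cs : List Char) :
    (cs.countP (fun ch => PySem.Chars.isalpha ch) : Int)
      - ((cs.count 'H' : Int) + (cs.count 'h' : Int))
    = (cs.countP (fun ch => PySem.Chars.isalpha ch && ch != 'H' && ch != 'h') : Int) := by
  induction cs with
  | nil => simp
  | cons c t ih =>
    simp only [List.countP_cons, List.count_cons]
    simp only [bne] at ih ⊢
    by_cases hH : c = 'H'
    · subst hH; simp [show PySem.Chars.isalpha 'H' = true from rfl]; omega
    · by_cases hh : c = 'h'
      · subst hh; simp [show PySem.Chars.isalpha 'h' = true from rfl]; omega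
      · have h1 : (c == 'H') = false := by simp [hH]
        have h2 : (c == 'h') = false := by simp [hh]
        simp only [h1, h2, Bool.not_false, Bool.and_true]
        by_cases ha : PySem.Chars.isalpha c = true
        · simp [ha]; push_cast at *; omega
        · simp [Bool.eq_false_iff.mpr ha] at *; omega

-- ===== VERDICT (by name: the statement is the Claim_ definition above) =====
theorem get_smiles_length_spec : Claim_equal_get_smiles_length := by
  intro smiles _
  unfold Spec_get_smiles_length get_smiles_length get_smiles_length_alt
  simp only [PySem.Str.count_eq, PySem.Str.len_eq]
  rw [show ("H" : String).toList = ['H'] from rfl, show ("h" : String).toList = ['h'] from rfl,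
      chars_count_single, chars_count_single]
  rw [PySem.List.foldl_pyRange_zero_pyGetD' smiles.toList ' '
        (fun (count : Int) ch => if PySem.Chars.isalpha ch then count + 1 else count) 0]
  rw [PySem.List.foldl_count_if, PySem.List.foldl_count_if]
  simpa using countP_sub_counts smiles.toList
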